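-- pv_equiv track=rewrite | github.com/william-156/AptaMotif1.1 | structure_analysis.py | _extract_bulges
-- ===== SOURCE A (Python) =====
-- def _extract_bulges(structure):
--     """Extract bulge regions (unpaired bases on one side of stem)."""
--     # Simplified bulge detection
--     bulges = []
--     unpaired = 0
--
--     for i, char in enumerate(structure):
--         if char == '.':
--             unpaired += 1
--         else:
--             if unpaired > 0 and unpaired < 5:  # Small unpaired regions are bulges
--                 bulges.append(unpaired)
--             unpaired = 0
--
--     return bulges
-- ===== SOURCE B (Python) =====
-- import re
--
-- def _extract_bulges(structure):
--     """Extract bulge regions (unpaired bases on one side of stem)."""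
--     parts = re.split(r'[^.]', structure)
--     return [len(p) for p in parts[:-1] if 0 < len(p) < 5]
-- ===== Notes on version B (the rewrite author's own statement) =====
-- stated objective: idiomatic
-- what changed: Replaces the incremental counter/flush scan with a regex split on non-dot characters: maximal dot-runs become the split parts, the trailing (unterminated) run is dropped via parts[:-1], and a comprehension keeps run lengths 1-4.
import Mathlib
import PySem

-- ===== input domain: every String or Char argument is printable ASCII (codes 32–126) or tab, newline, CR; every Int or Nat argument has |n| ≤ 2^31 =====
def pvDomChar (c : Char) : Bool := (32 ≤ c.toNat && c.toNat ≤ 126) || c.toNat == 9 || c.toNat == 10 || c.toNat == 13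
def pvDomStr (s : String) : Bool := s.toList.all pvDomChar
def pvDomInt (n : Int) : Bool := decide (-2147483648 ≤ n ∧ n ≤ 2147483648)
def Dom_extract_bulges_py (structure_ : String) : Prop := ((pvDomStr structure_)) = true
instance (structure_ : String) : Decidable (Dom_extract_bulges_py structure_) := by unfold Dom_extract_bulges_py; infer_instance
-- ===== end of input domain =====

-- B replaces A's counter/flush scan by a regex split into maximal dot-runs,
-- dropping the trailing run and filtering by length (idiomatic; same cost).

-- ===== PORT A =====
-- counter/flush loop over the characters, state = (bulges so far, current unpaired count)
def extract_bulges_py (structure_ : String) : List Int :=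
  (structure_.toList.foldl
    (fun (s : List Int × Int) (c : Char) =>
      if c = '.' then (s.1, s.2 + 1)
      else (if s.2 > 0 ∧ s.2 < 5 then s.1 ++ [s.2] else s.1, 0))
    ([], 0)).1

-- ===== PORT B =====
-- hand port of re.split(r'[^.]', structure): each non-dot char is a separator,
-- parts are the (possibly empty) dot-runs between separators; exact on this pattern.
def pySplitNonDot : List Char → List (List Char)
  | [] => [[]]
  | c :: rest =>
      let ps := pySplitNonDot rest
      if c = '.' then (c :: ps.headI) :: ps.tail else [] :: ps

def extract_bulges_py_alt (structure_ : String) : List Int :=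
  let parts := pySplitNonDot structure_.toList
  (parts.dropLast.filter (fun p => decide (0 < p.length ∧ p.length < 5))).map
    (fun p => (p.length : Int))

-- ===== PRECONDITION & SPEC =====
def Spec_extract_bulges_py (structure_ : String) (out : List Int) : Prop := out = extract_bulges_py_alt structure_
instance (structure_ : String) (out : List Int) : Decidable (Spec_extract_bulges_py structure_ out) := by unfold Spec_extract_bulges_py; infer_instance

-- ===== CLAIM (what is proved, stated in full; the proofs are below) =====
def Claim_equal_extract_bulges_py : Prop := ∀ (structure_ : String), Dom_extract_bulges_py structure_ → Spec_extract_bulges_py structure_ (extract_bulges_py structure_)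

-- ===== LEMMAS AND PROOFS =====

-- spec function for A's loop: g u l = bulges emitted over l with u pending dots
def gSpec : Nat → List Char → List Int
  | u, [] => []
  | u, c :: l =>
      if c = '.' then gSpec (u + 1) l
      else (if 0 < u ∧ u < 5 then [(u : Int)] else []) ++ gSpec 0 l

-- B's post-processing of a parts list
def mfSpec (ps : List (List Char)) : List Int :=
  (ps.filter (fun p => decide (0 < p.length ∧ p.length < 5))).map (fun p => (p.length : Int))

def addFirst (u : Nat) (ps : List (List Char)) : List (List Char) :=
  (List.replicate u '.' ++ ps.headI) :: ps.tail

theorem headI_cons_tail_eq {α : Type} [Inhabited α] (l : List α) (h : l ≠ []) : l.headI :: l.tail = l := by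
  cases l with
  | nil => exact absurd rfl h
  | cons a l => rfl

theorem pySplitNonDot_ne_nil (l : List Char) : pySplitNonDot l ≠ [] := by
  cases l with
  | nil => simp [pySplitNonDot]
  | cons c rest =>
      simp only [pySplitNonDot]
      split <;> simp

theorem foldl_eq_gSpec (l : List Char) (acc : List Int) (u : Nat) :
    (l.foldl
      (fun (s : List Int × Int) (c : Char) =>
        if c = '.' then (s.1, s.2 + 1)
        else (if s.2 > 0 ∧ s.2 < 5 then s.1 ++ [s.2] else s.1, 0))
      (acc, (u : Int))).1 = acc ++ gSpec u l := by
  induction l generalizing acc u with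
  | nil => simp [gSpec]
  | cons c l ih =>
      by_cases hc : c = '.'
      · have h1 : ((u : Int) + 1) = ((u + 1 : Nat) : Int) := by push_cast; ring
        simp only [List.foldl_cons, hc, if_true, gSpec, h1]
        exact ih acc (u + 1)
      · have hcond : ((u : Int) > 0 ∧ (u : Int) < 5) ↔ (0 < u ∧ u < 5) := by
          constructor <;> intro h <;> constructor <;> omega
        simp only [List.foldl_cons, hc, gSpec, if_false]
        by_cases hu : 0 < u ∧ u < 5
        · rw [if_pos (hcond.mpr hu), if_pos hu]
          have h2 := ih (acc ++ [(u : Int)]) 0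
          simp only [Nat.cast_zero] at h2
          rw [h2, List.append_assoc]
        · rw [if_neg (fun h => hu (hcond.mp h)), if_neg hu]
          have h2 := ih acc 0
          simp only [Nat.cast_zero] at h2
          rw [h2]
          simp

theorem gSpec_eq_mf (l : List Char) (u : Nat) :
    gSpec u l = mfSpec (addFirst u (pySplitNonDot l)).dropLast := by
  induction l generalizing u with
  | nil => simp [gSpec, pySplitNonDot, addFirst, mfSpec]
  | cons c l ih =>
      by_cases hc : c = '.'
      · subst hc
        have hrep : ∀ p : List Char,
            List.replicate u '.' ++ '.' :: p = List.replicate (u + 1) '.' ++ p := by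
          intro p; rw [List.replicate_succ']; simp
        simp [gSpec, pySplitNonDot, addFirst, ih, hrep]
      · simp only [gSpec, if_neg hc, pySplitNonDot, if_neg hc, addFirst,
          List.headI_cons, List.tail_cons]
        have hne := pySplitNonDot_ne_nil l
        rw [List.dropLast_cons_of_ne_nil hne]
        have h0 : addFirst 0 (pySplitNonDot l) = pySplitNonDot l := by
          unfold addFirst
          simp only [List.replicate_zero, List.nil_append]
          exact headI_cons_tail_eq _ hne
        rw [ih 0, h0]
        by_cases hu : 0 < u ∧ u < 5
        · rw [if_pos hu]
          simp [mfSpec, List.filter_cons, hu]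
        · rw [if_neg hu]
          simp [mfSpec, List.filter_cons, hu]

-- ===== VERDICT (by name: the statement is the Claim_ definition above) =====
theorem extract_bulges_py_spec : Claim_equal_extract_bulges_py := by
  intro s _
  show extract_bulges_py s = extract_bulges_py_alt s
  unfold extract_bulges_py extract_bulges_py_alt
  have h := foldl_eq_gSpec s.toList [] 0
  simp only [Nat.cast_zero] at h
  rw [h, List.nil_append, gSpec_eq_mf]
  have hne := pySplitNonDot_ne_nil s.toList
  have h0 : addFirst 0 (pySplitNonDot s.toList) = pySplitNonDot s.toList := by
    unfold addFirst
    exact headI_cons_tail_eq _ hne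
  rw [h0]
  rfl
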